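-- pv_equiv track=rewrite | github.com/yurrrri/algorithm_solving | 프로그래머스/1/118666. 성격 유형 검사하기/성격 유형 검사하기.py | solution
-- ===== SOURCE A (Python) =====
-- def solution(survey, choices):
--     dic = {"R": 0, "T": 0, "C": 0, "F": 0, "J": 0, "M": 0, "A": 0, "N": 0}
--     jipyos = [("R", "T"), ("C", "F"), ("J", "M"), ("A", "N")]
--
--     for i, s in enumerate(survey):
--         if choices[i] < 4:
--             dic[s[0]] += 4 - choices[i]
--         elif choices[i] > 4:
--             dic[s[1]] += choices[i] - 4
--
--     answer = ''
--     for a, b in jipyos: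
--         if dic[a] > dic[b]:
--             answer += a
--         elif dic[a] < dic[b]:
--             answer += b
--         else:
--             answer += a
--
--     return answer
-- ===== SOURCE B (Python) =====
-- def solution(survey, choices):
--     # Staged per-pair passes: each indicator pair is decided independently by two
--     # filtered sums over the survey; no shared counter structure at all.
--     def score(letter):
--         return sum(abs(c - 4) for s, c in zip(survey, choices)
--                    if c != 4 and (s[0] if c < 4 else s[1]) == letter)
--     return ''.join(a if score(a) >= score(b) else b
--                    for a, b in [('R', 'T'), ('C', 'F'), ('J', 'M'), ('A', 'N')])
-- ===== Notes on version B (the rewrite author's own statement) =====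
-- stated objective: alternative
-- what changed: B has no counter dictionary at all: each of the four indicator pairs is decided independently by two filtered sums (one staged pass per letter) over zip(survey, choices), with the pair's first letter on score(a) >= score(b); A instead makes a single pass mutating an 8-key counter dict via an if/elif split and then compares counters.
import Mathlib
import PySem

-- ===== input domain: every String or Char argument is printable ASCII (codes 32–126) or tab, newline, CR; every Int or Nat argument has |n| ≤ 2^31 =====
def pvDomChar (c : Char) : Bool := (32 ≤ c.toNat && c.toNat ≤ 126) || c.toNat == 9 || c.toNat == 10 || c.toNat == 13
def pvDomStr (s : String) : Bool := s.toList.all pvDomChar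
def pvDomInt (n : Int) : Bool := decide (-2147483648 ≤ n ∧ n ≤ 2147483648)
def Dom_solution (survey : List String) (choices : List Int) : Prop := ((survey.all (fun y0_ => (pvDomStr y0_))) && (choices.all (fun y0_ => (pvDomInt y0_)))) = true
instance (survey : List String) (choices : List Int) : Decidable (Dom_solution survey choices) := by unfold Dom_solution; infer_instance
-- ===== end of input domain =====

-- B decides each indicator pair independently by two filtered sums over zip(survey, choices)
-- (staged per-letter passes, no counter dictionary), instead of A's single pass mutating an
-- 8-key counter dict; same O(n) cost, a different decomposition.


-- ===== PORT A =====
-- the dict literal {"R": 0, …}; Python's 1-char string keys are ported as Char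
def dicA0 : PySem.Dict Char Int :=
  PySem.Dict.ofList [('R',0),('T',0),('C',0),('F',0),('J',0),('M',0),('A',0),('N',0)]

def jipyosA : List (Char × Char) := [('R','T'),('C','F'),('J','M'),('A','N')]

-- one iteration of A's loop body; `none` branches are where the Python raises (outside Pre_)
def stepA (choices : List Int) (dic : PySem.Dict Char Int) (p : Int × String) :
    PySem.Dict Char Int :=
  match PySem.List.pyGet? choices p.1 with
  | none => dic            -- choices[i]: IndexError in Python
  | some c =>
    if c < 4 then
      match PySem.Str.pyGet? p.2 0 with
      | none => dic        -- s[0]: IndexError in Python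
      | some ch => dic.insert ch (dic.getD ch 0 + (4 - c))   -- dic[s[0]] += 4 - choices[i]
    else if c > 4 then
      match PySem.Str.pyGet? p.2 1 with
      | none => dic        -- s[1]: IndexError in Python
      | some ch => dic.insert ch (dic.getD ch 0 + (c - 4))   -- dic[s[1]] += choices[i] - 4
    else dic

-- A's answer-building loop (answer kept as List Char, made a String at the end)
def ansA (dic : PySem.Dict Char Int) : List Char :=
  jipyosA.foldl (fun ans p =>
    if dic.getD p.1 0 > dic.getD p.2 0 then ans ++ [p.1]
    else if dic.getD p.1 0 < dic.getD p.2 0 then ans ++ [p.2]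
    else ans ++ [p.1]) []

def solution (survey : List String) (choices : List Int) : String :=
  String.ofList (ansA ((PySem.List.enumerate survey 0).foldl (stepA choices) dicA0))

-- ===== PORT B =====
-- the letter the question credits: s[0] if c < 4 else s[1] (none = IndexError, outside Pre_)
def touchedB (s : String) (c : Int) : Option Char :=
  if c < 4 then PySem.Str.pyGet? s 0 else PySem.Str.pyGet? s 1

-- score(letter) = sum(abs(c-4) for s,c in zip(survey,choices) if c != 4 and (...) == letter);
-- the '?' default stands for the IndexError case (unreachable inside Pre_, and '?' is no letter)
def scoreB (letter : Char) : List (String × Int) → Int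
  | [] => 0
  | q :: l =>
      (if q.2 ≠ 4 ∧ (touchedB q.1 q.2).getD '?' = letter then |q.2 - 4| else 0) + scoreB letter l

def solution_alt (survey : List String) (choices : List Int) : String :=
  String.ofList ((([('R','T'),('C','F'),('J','M'),('A','N')] : List (Char × Char)).map
    (fun p => if scoreB p.1 (survey.zip choices) ≥ scoreB p.2 (survey.zip choices)
              then p.1 else p.2)))

-- ===== PRECONDITION & SPEC =====
-- Pre_ is exactly where the Python A returns normally: a choice for every question, and for
-- every question with choice ≠ 4 the accessed letter survey[i][0] / survey[i][1] exists and is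
-- one of the eight type letters (otherwise A raises IndexError/KeyError; the getD default '?'
-- is not a type letter, so it stands for the out-of-range case).
def Pre_solution (survey : List String) (choices : List Int) : Prop :=
  survey.length ≤ choices.length ∧
    ∀ p ∈ survey.zip choices,
      (p.2 < 4 → (PySem.Str.pyGet? p.1 0).getD '?' ∈ (['R','T','C','F','J','M','A','N'] : List Char)) ∧
      (4 < p.2 → (PySem.Str.pyGet? p.1 1).getD '?' ∈ (['R','T','C','F','J','M','A','N'] : List Char))
instance (survey : List String) (choices : List Int) : Decidable (Pre_solution survey choices) := by
  unfold Pre_solution; infer_instance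

def pvWitness_solution : List String × List Int := (["RT","TR","CF","AN"], [1,5,4,7])

def Spec_solution (survey : List String) (choices : List Int) (out : String) : Prop :=
  out = solution_alt survey choices
instance (survey : List String) (choices : List Int) (out : String) : Decidable (Spec_solution survey choices out) := by
  unfold Spec_solution; infer_instance

-- ===== CLAIM =====
def Claim_equal_solution : Prop := ∀ (survey : List String) (choices : List Int),
  Dom_solution survey choices → Pre_solution survey choices →
    Spec_solution survey choices (solution survey choices)

-- ===== LEMMAS AND PROOFS =====
set_option maxHeartbeats 1000000

-- A's loop body once the index lookup choices[i] has succeeded with value p.2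
def stepA2 (dic : PySem.Dict Char Int) (p : String × Int) : PySem.Dict Char Int :=
  if p.2 < 4 then
    match PySem.Str.pyGet? p.1 0 with
    | none => dic
    | some ch => dic.insert ch (dic.getD ch 0 + (4 - p.2))
  else if p.2 > 4 then
    match PySem.Str.pyGet? p.1 1 with
    | none => dic
    | some ch => dic.insert ch (dic.getD ch 0 + (p.2 - 4))
  else dic

-- one A-step changes the counter of letter x exactly by B's contribution of that question
lemma stepA2_getD (d : PySem.Dict Char Int) (q : String × Int) (x : Char) (hx : x ≠ '?') :
    (stepA2 d q).getD x 0 =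
      d.getD x 0 + (if q.2 ≠ 4 ∧ (touchedB q.1 q.2).getD '?' = x then |q.2 - 4| else 0) := by
  obtain ⟨s, c⟩ := q
  simp only [stepA2]
  rcases lt_trichotomy c 4 with h | h | h
  · rw [if_pos h, show touchedB s c = PySem.Str.pyGet? s 0 from by simp [touchedB, h]]
    rcases ho : PySem.Str.pyGet? s 0 with _ | ch
    · simp only [Option.getD_none]
      rw [if_neg (by rintro ⟨-, rfl⟩; exact hx rfl)]
      ring
    · simp only [Option.getD_some, PySem.Dict.getD_insert]
      by_cases hxc : x = ch
      · subst hxc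
        rw [if_pos rfl, if_pos ⟨by omega, rfl⟩, abs_of_neg (by omega : c - 4 < 0)]
        ring
      · rw [if_neg hxc, if_neg (by rintro ⟨-, h⟩; exact hxc h.symm)]
        ring
  · subst h
    rw [if_neg (by omega), if_neg (by omega),
      if_neg (by rintro ⟨h, -⟩; exact h rfl)]
    ring
  · rw [if_neg (by omega), if_pos h,
      show touchedB s c = PySem.Str.pyGet? s 1 from by
        simp [touchedB, show ¬ c < 4 by omega]]
    rcases ho : PySem.Str.pyGet? s 1 with _ | ch
    · simp only [Option.getD_none]
      rw [if_neg (by rintro ⟨-, rfl⟩; exact hx rfl)]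
      ring
    · simp only [Option.getD_some, PySem.Dict.getD_insert]
      by_cases hxc : x = ch
      · subst hxc
        rw [if_pos rfl, if_pos ⟨by omega, rfl⟩, abs_of_pos (by omega : (0:Int) < c - 4)]
      · rw [if_neg hxc, if_neg (by rintro ⟨-, h⟩; exact hxc h.symm)]
        ring

-- the counter of a letter after A's whole loop is its initial value plus B's filtered sum
lemma foldl_getD_score : ∀ (l : List (String × Int)) (d : PySem.Dict Char Int) (x : Char),
    x ≠ '?' → (l.foldl stepA2 d).getD x 0 = d.getD x 0 + scoreB x l := by
  intro l
  induction l with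
  | nil => intro d x _; simp [scoreB]
  | cons q l ih =>
    intro d x hx
    simp only [List.foldl_cons, scoreB]
    rw [ih _ x hx, stepA2_getD d q x hx]
    ring

-- one step of A's answer loop folded into a single if (tie goes to the first letter)
lemma step_ans (ans : List Char) (u v : Int) (a b : Char) :
    (if u > v then ans ++ [a] else if u < v then ans ++ [b] else ans ++ [a])
      = ans ++ [if u ≥ v then a else b] := by
  split_ifs <;> first | rfl | omega

-- A's enumerate-and-index loop is the fold of stepA2 over zip(survey, choices)
lemma A_enum_zip : ∀ (ss : List String) (pre cs : List Int) (d : PySem.Dict Char Int),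
    ss.length ≤ cs.length →
    (PySem.List.enumerate ss (pre.length : Int)).foldl (stepA (pre ++ cs)) d
      = (ss.zip cs).foldl stepA2 d := by
  intro ss
  induction ss with
  | nil => intro pre cs d _; simp [PySem.List.enumerate_nil]
  | cons s ss ih =>
    intro pre cs d h
    cases cs with
    | nil => simp at h
    | cons c cs =>
      rw [PySem.List.enumerate_cons]
      simp only [List.foldl_cons, List.zip_cons_cons]
      have hlook : PySem.List.pyGet? (pre ++ c :: cs) ((pre.length : Nat) : Int) = some c := by
        rw [PySem.List.pyGet?_natCast]
        simp
      have hstep : stepA (pre ++ c :: cs) d ((pre.length : Int), s) = stepA2 d (s, c) := by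
        simp only [stepA, stepA2, hlook]
      rw [hstep]
      have h' : ss.length ≤ cs.length := by simpa using h
      have := ih (pre ++ [c]) cs (stepA2 d (s, c)) h'
      simp only [List.append_assoc, List.singleton_append, List.length_append,
        List.length_singleton] at this
      have hcast : ((pre.length + 1 : Nat) : Int) = (pre.length : Int) + 1 := by push_cast; ring
      rw [hcast] at this
      exact this

-- ===== VERDICT =====
theorem solution_spec : Claim_equal_solution := by
  intro survey choices _ hpre
  unfold Spec_solution solution solution_alt
  have hzip : (PySem.List.enumerate survey 0).foldl (stepA choices) dicA0
      = (survey.zip choices).foldl stepA2 dicA0 := by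
    have := A_enum_zip survey [] choices dicA0 hpre.1
    simpa using this
  rw [hzip]
  have hs : ∀ x : Char, x ≠ '?' →
      ((survey.zip choices).foldl stepA2 dicA0).getD x 0
        = dicA0.getD x 0 + scoreB x (survey.zip choices) :=
    fun x hx => foldl_getD_score _ dicA0 x hx
  simp only [ansA, jipyosA, List.foldl_cons, List.foldl_nil, step_ans, List.nil_append,
    List.map_cons, List.map_nil,
    hs 'R' (by decide), hs 'T' (by decide), hs 'C' (by decide), hs 'F' (by decide),
    hs 'J' (by decide), hs 'M' (by decide), hs 'A' (by decide), hs 'N' (by decide)]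
  simp [show dicA0.getD 'R' 0 = (0:Int) from rfl, show dicA0.getD 'T' 0 = (0:Int) from rfl,
    show dicA0.getD 'C' 0 = (0:Int) from rfl, show dicA0.getD 'F' 0 = (0:Int) from rfl,
    show dicA0.getD 'J' 0 = (0:Int) from rfl, show dicA0.getD 'M' 0 = (0:Int) from rfl,
    show dicA0.getD 'A' 0 = (0:Int) from rfl, show dicA0.getD 'N' 0 = (0:Int) from rfl]
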